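-- pv_equiv track=rewrite | github.com/zhudingsuifeng/Python | 2018/listK.py | lk
-- ===== SOURCE A (Python) =====
-- def lk(k):    # 时间复杂度过高
--     if k < 3:
--         return k
--     dp = [0]*k
--     dp[0], dp[1] = 1, 2
--     for i in range(2, k):
--         dp[i] = 2*dp[i-1] + dp[i-2]
--     return dp[-1]%32767
-- ===== SOURCE B (Python) =====
-- def lk(k):
--     if k < 3:
--         return k
--     M = 32767
--     a, b, c, d = 1, 0, 0, 1          # accumulator = identity matrix
--     p, q, r, s = 2, 1, 1, 0          # transition matrix of x_n = 2*x_{n-1} + x_{n-2}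
--     e = k - 2
--     while e:
--         if e & 1:
--             a, b, c, d = (a*p + b*r) % M, (a*q + b*s) % M, (c*p + d*r) % M, (c*q + d*s) % M
--         p, q, r, s = (p*p + q*r) % M, (p*q + q*s) % M, (r*p + s*r) % M, (r*q + s*s) % M
--         e >>= 1
--     return (2*a + b) % M
-- ===== Notes on version B (the rewrite author's own statement) =====
-- stated objective: faster
-- what changed: Replaced the O(k)-step dp array recurrence on unreduced big integers by exponentiation-by-squaring of the 2x2 transition matrix with every entry reduced mod 32767.
import Mathlib
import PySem

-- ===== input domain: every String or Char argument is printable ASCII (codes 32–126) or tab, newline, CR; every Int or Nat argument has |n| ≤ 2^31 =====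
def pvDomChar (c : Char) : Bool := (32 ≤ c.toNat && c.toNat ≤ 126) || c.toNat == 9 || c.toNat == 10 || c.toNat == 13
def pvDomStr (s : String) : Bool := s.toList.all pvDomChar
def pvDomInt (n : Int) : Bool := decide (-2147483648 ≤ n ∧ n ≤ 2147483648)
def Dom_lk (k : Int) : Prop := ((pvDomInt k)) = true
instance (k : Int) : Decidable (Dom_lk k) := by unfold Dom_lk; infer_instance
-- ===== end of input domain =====

-- B replaces A's O(k) dp loop over ever-growing integers by 2x2 matrix exponentiation
-- by squaring modulo 32767 (objective: faster, measured).

-- ===== PORT A =====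
-- dp[i] = 2*dp[i-1] + dp[i-2]; whenever this runs, 2 <= i < len(dp), so the indices
-- i, i-1, i-2 are nonnegative and in range and setIfInBounds / toNat / [.]! are exact here
def lkStep (dp : Array Int) (i : Int) : Array Int :=
  dp.setIfInBounds i.toNat (2 * dp[(i - 1).toNat]! + dp[(i - 2).toNat]!)

def lk (k : Int) : Int :=
  if k < 3 then k
  else
    -- dp = [0]*k; dp[0], dp[1] = 1, 2
    -- for i in range(2, k): dp[i] = 2*dp[i-1] + dp[i-2]
    let dp := (PySem.List.pyRange 2 k 1).foldl lkStep
      (((Array.replicate k.toNat (0 : Int)).setIfInBounds 0 1).setIfInBounds 1 2)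
    -- return dp[-1] % 32767   (dp nonempty since k >= 3; % by a positive modulus = Lean's %)
    PySem.Int.mod dp[dp.size - 1]! 32767

-- ===== PORT B =====
-- one 2x2 matrix product with every entry reduced % 32767 (the tuple is (a,b,c,d) row-major)
def lkMul (X Y : Int × Int × Int × Int) : Int × Int × Int × Int :=
  ((X.1 * Y.1 + X.2.1 * Y.2.2.1) % 32767,
   (X.1 * Y.2.1 + X.2.1 * Y.2.2.2) % 32767,
   (X.2.2.1 * Y.1 + X.2.2.2 * Y.2.2.1) % 32767,
   (X.2.2.1 * Y.2.1 + X.2.2.2 * Y.2.2.2) % 32767)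

-- the 'while e:' loop of Source B; e & 1 = e % 2 for e >= 0, e >>= 1 = e / 2
def lkPowLoop (acc base : Int × Int × Int × Int) (e : Nat) : Int × Int × Int × Int :=
  if h : e = 0 then acc
  else lkPowLoop (if e % 2 = 1 then lkMul acc base else acc) (lkMul base base) (e / 2)
  termination_by e
  decreasing_by omega

def lk_alt (k : Int) : Int :=
  if k < 3 then k
  else
    -- e = k - 2 (nonnegative here, so toNat is exact); result (2*a + b) % 32767
    (2 * (lkPowLoop (1, 0, 0, 1) (2, 1, 1, 0) (k - 2).toNat).1 +
       (lkPowLoop (1, 0, 0, 1) (2, 1, 1, 0) (k - 2).toNat).2.1) % 32767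

-- ===== PRECONDITION & SPEC =====
def Spec_lk (k : Int) (out : Int) : Prop := out = lk_alt k
instance (k : Int) (out : Int) : Decidable (Spec_lk k out) := by unfold Spec_lk; infer_instance

-- ===== CLAIM (what is proved, stated in full; the proofs are below) =====
def Claim_equal_lk : Prop := ∀ (k : Int), Dom_lk k → Spec_lk k (lk k)

-- ===== LEMMAS AND PROOFS =====

-- the Pell-like reference sequence
def pvU : Nat → Int
  | 0 => 0
  | 1 => 1
  | n + 2 => 2 * pvU (n + 1) + pvU n

-- pure (un-reduced) 2x2 product and power
def pvMulP (X Y : Int × Int × Int × Int) : Int × Int × Int × Int :=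
  (X.1 * Y.1 + X.2.1 * Y.2.2.1,
   X.1 * Y.2.1 + X.2.1 * Y.2.2.2,
   X.2.2.1 * Y.1 + X.2.2.2 * Y.2.2.1,
   X.2.2.1 * Y.2.1 + X.2.2.2 * Y.2.2.2)

def pvPow (X : Int × Int × Int × Int) : Nat → Int × Int × Int × Int
  | 0 => (1, 0, 0, 1)
  | n + 1 => pvMulP (pvPow X n) X

def pvModM (X : Int × Int × Int × Int) : Int × Int × Int × Int :=
  (X.1 % 32767, X.2.1 % 32767, X.2.2.1 % 32767, X.2.2.2 % 32767)

lemma lkMul_eq (X Y : Int × Int × Int × Int) : lkMul X Y = pvModM (pvMulP X Y) := rfl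

lemma pvMulP_assoc (X Y Z : Int × Int × Int × Int) :
    pvMulP (pvMulP X Y) Z = pvMulP X (pvMulP Y Z) := by
  simp only [pvMulP, Prod.mk.injEq]
  refine ⟨by ring, by ring, by ring, by ring⟩

lemma pvMulP_one (X : Int × Int × Int × Int) : pvMulP X (1, 0, 0, 1) = X := by
  simp [pvMulP]

lemma pvOne_mulP (X : Int × Int × Int × Int) : pvMulP (1, 0, 0, 1) X = X := by
  simp [pvMulP]

lemma pvModM_idem (X : Int × Int × Int × Int) : pvModM (pvModM X) = pvModM X := by
  simp [pvModM, Int.emod_emod_of_dvd]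

lemma pvMulP_congr {X X' Y Y' : Int × Int × Int × Int}
    (hX : pvModM X = pvModM X') (hY : pvModM Y = pvModM Y') :
    pvModM (pvMulP X Y) = pvModM (pvMulP X' Y') := by
  simp only [pvModM, Prod.mk.injEq] at hX hY ⊢
  obtain ⟨ha, hb, hc, hd⟩ := hX
  obtain ⟨hp, hq, hr, hs⟩ := hY
  have ha' : Int.ModEq 32767 X.1 X'.1 := ha
  have hb' : Int.ModEq 32767 X.2.1 X'.2.1 := hb
  have hc' : Int.ModEq 32767 X.2.2.1 X'.2.2.1 := hc
  have hd' : Int.ModEq 32767 X.2.2.2 X'.2.2.2 := hd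
  have hp' : Int.ModEq 32767 Y.1 Y'.1 := hp
  have hq' : Int.ModEq 32767 Y.2.1 Y'.2.1 := hq
  have hr' : Int.ModEq 32767 Y.2.2.1 Y'.2.2.1 := hr
  have hs' : Int.ModEq 32767 Y.2.2.2 Y'.2.2.2 := hs
  exact ⟨(ha'.mul hp').add (hb'.mul hr'), (ha'.mul hq').add (hb'.mul hs'),
         (hc'.mul hp').add (hd'.mul hr'), (hc'.mul hq').add (hd'.mul hs')⟩

lemma pvPow_congr {X X' : Int × Int × Int × Int} (h : pvModM X = pvModM X') (n : Nat) :
    pvModM (pvPow X n) = pvModM (pvPow X' n) := by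
  induction n with
  | zero => rfl
  | succ n ih => exact pvMulP_congr ih h

lemma pvPow_comm (X : Int × Int × Int × Int) (n : Nat) :
    pvMulP X (pvPow X n) = pvMulP (pvPow X n) X := by
  induction n with
  | zero => rw [pvPow, pvMulP_one, pvOne_mulP]
  | succ n ih => rw [pvPow, ← pvMulP_assoc, ih]

lemma pvPow_sq (X : Int × Int × Int × Int) (n : Nat) :
    pvPow (pvMulP X X) n = pvPow X (2 * n) := by
  induction n with
  | zero => rfl
  | succ n ih =>
    have h2 : 2 * (n + 1) = (2 * n + 1) + 1 := by ring
    rw [pvPow, ih, h2, pvPow, pvPow, pvMulP_assoc]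

lemma lkPowLoop_spec (e : Nat) : ∀ acc base : Int × Int × Int × Int,
    pvModM (lkPowLoop acc base e) = pvModM (pvMulP acc (pvPow base e)) := by
  induction e using Nat.strong_induction_on with
  | _ e ih =>
    intro acc base
    rw [lkPowLoop]
    by_cases h : e = 0
    · subst h; simp [pvPow, pvMulP_one]
    · rw [dif_neg h]
      rw [ih (e / 2) (by omega)]
      have hbase : pvModM (pvPow (lkMul base base) (e / 2)) = pvModM (pvPow (pvMulP base base) (e / 2)) :=
        pvPow_congr (by rw [lkMul_eq, pvModM_idem]) _
      by_cases hodd : e % 2 = 1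
      · rw [if_pos hodd]
        have : pvModM (pvMulP (lkMul acc base) (pvPow (lkMul base base) (e / 2)))
             = pvModM (pvMulP (pvMulP acc base) (pvPow (pvMulP base base) (e / 2))) :=
          pvMulP_congr (by rw [lkMul_eq, pvModM_idem]) hbase
        rw [this, pvPow_sq, pvMulP_assoc, pvPow_comm, ← pvPow,
            show (2 * (e / 2)).succ = e from by omega]
      · rw [if_neg hodd]
        have : pvModM (pvMulP acc (pvPow (lkMul base base) (e / 2)))
             = pvModM (pvMulP acc (pvPow (pvMulP base base) (e / 2))) :=
          pvMulP_congr rfl hbase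
        rw [this, pvPow_sq]
        have he : 2 * (e / 2) = e := by omega
        rw [he]

lemma pvPow_T (n : Nat) :
    pvPow (2, 1, 1, 0) n = (pvU (n + 1), pvU n, pvU n, pvU (n + 1) - 2 * pvU n) := by
  induction n with
  | zero => simp [pvPow, pvU]
  | succ n ih =>
    rw [pvPow, ih]
    show (_, _, _, _) = _
    simp only [pvU, Prod.mk.injEq]
    refine ⟨by ring, by ring, by ring, by ring⟩

-- B computes pvU k.toNat % 32767 for k ≥ 3
lemma lk_alt_eq (k : Int) (hk : ¬ k < 3) : lk_alt k = pvU k.toNat % 32767 := by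
  rw [lk_alt, if_neg hk]
  have h := lkPowLoop_spec (k - 2).toNat (1, 0, 0, 1) (2, 1, 1, 0)
  rw [pvOne_mulP, pvPow_T] at h
  set m := lkPowLoop (1, 0, 0, 1) (2, 1, 1, 0) (k - 2).toNat with hm
  simp only [pvModM, Prod.mk.injEq] at h
  obtain ⟨h1, h2, -, -⟩ := h
  have hcast : (k - 2).toNat + 2 = k.toNat := by omega
  rw [← hcast, pvU]
  exact ((Int.ModEq.mul_left 2 h1).add h2)

-- ===== A-side lemmas =====

lemma lk_foldl_size (l : List Int) : ∀ dp : Array Int, (l.foldl lkStep dp).size = dp.size := by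
  induction l with
  | nil => intro dp; rfl
  | cons x xs ih => intro dp; rw [List.foldl_cons, ih, lkStep, Array.size_setIfInBounds]

lemma lk_loop (t : Nat) : ∀ (m : Nat) (dp : Array Int), 2 ≤ m →
    dp.size = m + t →
    (∀ j : Nat, j < m → dp[j]? = some (pvU (j + 1))) →
    ∀ j : Nat, j < m + t →
      ((PySem.List.pyRange (m : Int) ((m + t : Nat) : Int) 1).foldl lkStep dp)[j]? = some (pvU (j + 1)) := by
  induction t with
  | zero =>
    intro m dp h2 hlen hdp j hj
    simp only [Nat.add_zero] at hj ⊢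
    rw [PySem.List.pyRange_one_eq_nil (le_refl _)]
    simpa using hdp j hj
  | succ t ih =>
    intro m dp h2 hlen hdp j hj
    have hcast : ((m + (t + 1) : Nat) : Int) = (((m + 1) + t : Nat) : Int) := by push_cast; ring
    rw [hcast, PySem.List.pyRange_one_cons (by push_cast; omega), List.foldl_cons]
    have hg1 : dp[((m : Int) - 1).toNat]! = pvU m := by
      have e1 : ((m : Int) - 1).toNat = m - 1 := by omega
      have h := hdp (m - 1) (by omega)
      rw [e1, Array.getElem!_eq_getD, Array.getD_eq_getD_getElem?, h, Option.getD_some,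
          show m - 1 + 1 = m from by omega]
    have hg2 : dp[((m : Int) - 2).toNat]! = pvU (m - 1) := by
      have e2 : ((m : Int) - 2).toNat = m - 2 := by omega
      have h := hdp (m - 2) (by omega)
      rw [e2, Array.getElem!_eq_getD, Array.getD_eq_getD_getElem?, h, Option.getD_some,
          show m - 2 + 1 = m - 1 from by omega]
    have hv : pvU (m + 1) = 2 * pvU m + pvU (m - 1) := by
      rw [show m + 1 = (m - 1) + 2 from by omega, pvU, show m - 1 + 1 = m from by omega]
    have hstep : lkStep dp (m : Int) = dp.setIfInBounds m (pvU (m + 1)) := by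
      rw [lkStep, hg1, hg2, Int.toNat_natCast, hv]
    rw [hstep]
    have hlen' : (dp.setIfInBounds m (pvU (m + 1))).size = (m + 1) + t := by
      rw [Array.size_setIfInBounds, hlen]; omega
    have hdp' : ∀ j : Nat, j < m + 1 →
        (dp.setIfInBounds m (pvU (m + 1)))[j]? = some (pvU (j + 1)) := by
      intro j hj'
      rw [Array.getElem?_setIfInBounds]
      by_cases hjm : m = j
      · subst hjm
        rw [if_pos rfl, if_pos (by omega)]
      · rw [if_neg hjm]
        exact hdp j (by omega)
    have hm1 : ((m : Int) + 1) = ((m + 1 : Nat) : Int) := by push_cast; ring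
    rw [hm1]
    exact ih (m + 1) _ (by omega) hlen' hdp' j (by omega)

-- A computes pvU k.toNat % 32767 for k ≥ 3
lemma lk_eq (k : Int) (hk : ¬ k < 3) : lk k = pvU k.toNat % 32767 := by
  rw [lk, if_neg hk]
  show PySem.Int.mod
      (((PySem.List.pyRange 2 k 1).foldl lkStep
        (((Array.replicate k.toNat (0 : Int)).setIfInBounds 0 1).setIfInBounds 1 2))[
       ((PySem.List.pyRange 2 k 1).foldl lkStep
        (((Array.replicate k.toNat (0 : Int)).setIfInBounds 0 1).setIfInBounds 1 2)).size - 1]!)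
      32767 = pvU k.toNat % 32767
  have hdp0 : ∀ j : Nat, j < 2 →
      (((Array.replicate k.toNat (0 : Int)).setIfInBounds 0 1).setIfInBounds 1 2)[j]? = some (pvU (j + 1)) := by
    intro j hj
    interval_cases j
    · rw [Array.getElem?_setIfInBounds, if_neg (by omega : ¬ (1 = 0)),
          Array.getElem?_setIfInBounds, if_pos rfl,
          if_pos (by rw [Array.size_replicate]; omega)]
      rfl
    · rw [Array.getElem?_setIfInBounds, if_pos rfl,
          if_pos (by rw [Array.size_setIfInBounds, Array.size_replicate]; omega)]
      rfl
  have hloop := lk_loop (k.toNat - 2) 2 _ (le_refl 2)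
    (by rw [Array.size_setIfInBounds, Array.size_setIfInBounds, Array.size_replicate]; omega) hdp0
  have hb : ((2 + (k.toNat - 2) : Nat) : Int) = k := by omega
  have h2c : ((2 : Nat) : Int) = 2 := by norm_num
  rw [hb, h2c] at hloop
  set dp := (PySem.List.pyRange 2 k 1).foldl lkStep
      (((Array.replicate k.toNat (0 : Int)).setIfInBounds 0 1).setIfInBounds 1 2) with hdpd
  have hsz : dp.size = k.toNat := by
    rw [hdpd, lk_foldl_size, Array.size_setIfInBounds, Array.size_setIfInBounds, Array.size_replicate]
  have hj := hloop (k.toNat - 1) (by omega)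
  rw [show k.toNat - 1 + 1 = k.toNat from by omega] at hj
  rw [PySem.Int.mod_eq_emod_of_pos (by norm_num)]
  congr 1
  rw [hsz, Array.getElem!_eq_getD, Array.getD_eq_getD_getElem?, hj, Option.getD_some]

-- ===== VERDICT (by name: the statement is the Claim_ definition above) =====
theorem lk_spec : Claim_equal_lk := by
  intro k _
  unfold Spec_lk
  by_cases hk : k < 3
  · rw [lk, lk_alt, if_pos hk, if_pos hk]
  · rw [lk_eq k hk, lk_alt_eq k hk]
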